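-- pv_equiv track=rewrite | github.com/boweili666/scene_generation | pipelines/isaac/scene_renderer.py | _support_groups
-- ===== SOURCE A (Python) =====
-- from typing import Dict, Iterable, List, Optional, Tuple
--
-- def _relation_tokens(relation: str) -> List[str]:
--     tokens: List[str] = []
--     for rel in str(relation).split(","):
--         if not rel:
--             continue
--         tokens.append(rel)
--     return tokens
--
-- def _support_groups(object_entries: List[Dict], edges: List[Dict]) -> Dict[str, List[str]]:
--     prim_paths = [prim for entry in object_entries if isinstance((prim := entry.get("prim")), str)]
--     prim_set = set(prim_paths)
--     support_parent: Dict[str, str] = {}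
--     for edge in edges:
--         pair = _support_pair(edge)
--         if not pair:
--             continue
--         source_path, target_path = pair
--         if source_path in prim_set and target_path in prim_set:
--             support_parent[source_path] = target_path
--
--     def _group_root(prim_path: str) -> str:
--         seen = set()
--         current = prim_path
--         while current in support_parent and current not in seen:
--             seen.add(current)
--             current = support_parent[current]
--         return current
--
--     groups: Dict[str, List[str]] = {}
--     for prim_path in prim_paths:
--         groups.setdefault(_group_root(prim_path), []).append(prim_path)
--     return {root: sorted(members) for root, members in groups.items()}
--
-- def _support_pair(edge: Dict) -> Optional[Tuple[str, str]]:
--     """Return (top_object, base_supporter) if edge expresses support."""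
--     source = edge.get("source")
--     target = edge.get("target")
--     if not source or not target:
--         return None
--     rels = _relation_tokens(edge.get("relation", ""))
--     if "supported by" in rels:
--         return source, target
--     if "supports" in rels:
--         return target, source
--     return None
-- ===== SOURCE B (Python) =====
-- from typing import Dict, List
--
--
-- def _support_groups(object_entries: List[Dict], edges: List[Dict]) -> Dict[str, List[str]]:
--     prim_paths = []
--     for entry in object_entries:
--         prim = entry.get("prim")
--         if isinstance(prim, str):
--             prim_paths.append(prim)
--     prim_set = set(prim_paths)
--
--     parent: Dict[str, str] = {}
--     for edge in edges:
--         source = edge.get("source")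
--         target = edge.get("target")
--         if not source or not target:
--             continue
--         rels = [tok for tok in str(edge.get("relation", "")).split(",") if tok]
--         if "supported by" in rels:
--             child, base = source, target
--         elif "supports" in rels:
--             child, base = target, source
--         else:
--             continue
--         if child in prim_set and base in prim_set:
--             parent[child] = base
--
--     # Memoized root lookup: each support chain is walked once; later prims
--     # stop as soon as they reach an already-resolved node.
--     root: Dict[str, str] = {}
--     groups: Dict[str, List[str]] = {}
--     for p in prim_paths:
--         path = []
--         pos: Dict[str, int] = {}
--         cur = p
--         while cur not in root:
--             if cur not in parent:
--                 root[cur] = cur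
--                 break
--             if cur in pos:
--                 for node in path[pos[cur]:]:
--                     root[node] = node
--                 break
--             pos[cur] = len(path)
--             path.append(cur)
--             cur = parent[cur]
--         r = root[cur]
--         for node in path:
--             if node not in root:
--                 root[node] = r
--         if r in groups:
--             groups[r].append(p)
--         else:
--             groups[r] = [p]
--     return {r: sorted(members) for r, members in groups.items()}
-- ===== Notes on version B (the rewrite author's own statement) =====
-- stated objective: alternative
-- what changed: B replaces A's per-prim re-walk of the support-parent chain by a memoized root table: each resolved node's group root is cached (whole cycles are resolved in one pass), and later walks stop at any already-resolved node.
import Mathlib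
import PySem

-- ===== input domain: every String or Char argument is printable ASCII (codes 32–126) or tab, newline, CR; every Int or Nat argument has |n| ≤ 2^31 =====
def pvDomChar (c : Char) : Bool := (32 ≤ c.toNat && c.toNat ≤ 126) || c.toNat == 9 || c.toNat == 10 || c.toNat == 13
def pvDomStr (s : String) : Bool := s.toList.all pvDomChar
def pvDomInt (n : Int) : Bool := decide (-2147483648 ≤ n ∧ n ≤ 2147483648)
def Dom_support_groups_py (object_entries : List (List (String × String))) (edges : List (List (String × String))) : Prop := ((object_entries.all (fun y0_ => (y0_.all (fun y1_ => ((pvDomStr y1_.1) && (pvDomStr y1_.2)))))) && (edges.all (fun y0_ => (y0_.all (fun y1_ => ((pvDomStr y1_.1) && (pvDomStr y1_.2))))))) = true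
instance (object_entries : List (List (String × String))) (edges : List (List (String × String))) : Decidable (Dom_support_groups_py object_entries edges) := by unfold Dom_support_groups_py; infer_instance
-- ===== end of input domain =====

-- B replaces A's per-prim re-walk of the support chains by a memoized root table
-- (each chain node is resolved once); return values agree on every input.

-- ===== PORT A =====
-- _relation_tokens: str(relation).split(",") keeping only the non-empty tokens
def relation_tokens (relation : String) : List String :=
  -- s.split(",") never raises (separator non-empty), so the Option is always some
  ((PySem.Str.split? relation ",").getD []).foldl
    (fun tokens rel => if rel = "" then tokens else tokens ++ [rel]) []

-- _support_pair: (top_object, base_supporter) if the edge expresses support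
def support_pair (edge : PySem.Dict String String) : Option (String × String) :=
  let source := edge.get? "source"
  let target := edge.get? "target"
  match source, target with
  | some s, some t =>
    if s = "" || t = "" then none  -- 'if not source or not target'
    else
      let rels := relation_tokens (edge.getD "relation" "")
      if rels.contains "supported by" then some (s, t)
      else if rels.contains "supports" then some (t, s)
      else none
  | _, _ => none  -- a missing key is falsy ('not source or not target')

-- _group_root's while loop; the fuel (number of distinct chain keys + 1) is only a
-- totality guard: each iteration adds a fresh support_parent key to seen
def groupRootA (parent : PySem.Dict String String) : Nat → PySem.Set String → String → String
  | 0, _, current => current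
  | fuel+1, seen, current =>
    if parent.contains current && !(PySem.Set.contains seen current) then
      groupRootA parent fuel (PySem.Set.add seen current) (parent.getD current "")
    else current

def support_groups_py (object_entries : List (List (String × String))) (edges : List (List (String × String))) : List (String × List String) :=
  let prim_paths := object_entries.foldl (fun acc entry =>
      match PySem.Dict.get? (PySem.Dict.mk entry) "prim" with
      | some s => acc ++ [s]
      | none => acc) []
  let prim_set : PySem.Set String := PySem.Set.ofList prim_paths
  let support_parent := edges.foldl (fun d edge =>
      match support_pair (PySem.Dict.mk edge) with
      | none => d
      | some (source_path, target_path) =>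
        if PySem.Set.contains prim_set source_path && PySem.Set.contains prim_set target_path then
          d.insert source_path target_path
        else d) PySem.Dict.empty
  let groups := prim_paths.foldl (fun g prim_path =>
      -- groups.setdefault(_group_root(prim_path), []).append(prim_path)
      g.modify (groupRootA support_parent (support_parent.size + 1) PySem.Set.empty prim_path)
        [] (fun ms => ms ++ [prim_path]))
    (PySem.Dict.empty : PySem.Dict String (List String))
  groups.items.map (fun pr => (pr.1, PySem.List.sorted pr.2 (fun x => x) false))

-- ===== PORT B =====
-- 'if child in prim_set and base in prim_set: parent[child] = base'
def sgRecordEdge (prim_set : PySem.Set String) (d : PySem.Dict String String)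
    (child base : String) : PySem.Dict String String :=
  if PySem.Set.contains prim_set child && PySem.Set.contains prim_set base then
    d.insert child base
  else d

-- Source B's 'while cur not in root' loop; state = (root, pos, path, cur); the fuel is a
-- totality guard only (each iteration records a fresh parent key in pos)
def bLoop (parent : PySem.Dict String String) :
    Nat → PySem.Dict String String → PySem.Dict String Int → List String → String →
    PySem.Dict String String × List String × String
  | 0, root, _, path, cur => (root, path, cur)
  | fuel+1, root, pos, path, cur =>
    if root.contains cur then (root, path, cur)
    else if !parent.contains cur then (root.insert cur cur, path, cur)
    else
      match pos.get? cur with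
      | some i =>
        -- cycle: 'for node in path[pos[cur]:]: root[node] = node'
        ((PySem.List.slice path (some i) none).foldl (fun rt node => rt.insert node node) root,
         path, cur)
      | none =>
        bLoop parent fuel root (pos.insert cur (path.length : Int)) (path ++ [cur])
          (parent.getD cur "")

def support_groups_py_alt (object_entries : List (List (String × String))) (edges : List (List (String × String))) : List (String × List String) :=
  let prim_paths := object_entries.foldl (fun acc entry =>
      match PySem.Dict.get? (PySem.Dict.mk entry) "prim" with
      | some s => acc ++ [s]
      | none => acc) []
  let prim_set : PySem.Set String := PySem.Set.ofList prim_paths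
  let parent := edges.foldl (fun d edge =>
      let source := PySem.Dict.get? (PySem.Dict.mk edge) "source"
      let target := PySem.Dict.get? (PySem.Dict.mk edge) "target"
      match source, target with
      | some s, some t =>
        if s = "" || t = "" then d  -- 'if not source or not target: continue'
        else
          let rels := ((PySem.Str.split? (PySem.Dict.getD (PySem.Dict.mk edge) "relation" "") ",").getD []).filter
            (fun tok => !(tok = ""))
          if rels.contains "supported by" then sgRecordEdge prim_set d s t
          else if rels.contains "supports" then sgRecordEdge prim_set d t s
          else d
      | _, _ => d) PySem.Dict.empty
  let result := prim_paths.foldl (fun st p =>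
      let (root0, groups) := st
      let (root1, path, cur) := bLoop parent (parent.size + 1) root0 PySem.Dict.empty [] p
      let r := root1.getD cur ""
      let root2 := path.foldl (fun rt node => if rt.contains node then rt else rt.insert node r) root1
      let groups' :=
        match groups.get? r with
        | some ms => groups.insert r (ms ++ [p])
        | none => groups.insert r [p]
      (root2, groups'))
    ((PySem.Dict.empty : PySem.Dict String String), (PySem.Dict.empty : PySem.Dict String (List String)))
  result.2.items.map (fun pr => (pr.1, PySem.List.sorted pr.2 (fun x => x) false))

-- ===== PRECONDITION & SPEC =====
def Spec_support_groups_py (object_entries : List (List (String × String))) (edges : List (List (String × String))) (out : List (String × List String)) : Prop := out = support_groups_py_alt object_entries edges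
instance (object_entries : List (List (String × String))) (edges : List (List (String × String))) (out : List (String × List String)) : Decidable (Spec_support_groups_py object_entries edges out) := by unfold Spec_support_groups_py; infer_instance

-- ===== CLAIM (what is proved, stated in full; the proofs are below) =====
def Claim_equal_support_groups_py : Prop := ∀ (object_entries : List (List (String × String))) (edges : List (List (String × String))), Dom_support_groups_py object_entries edges → Spec_support_groups_py object_entries edges (support_groups_py object_entries edges)

-- ===== LEMMAS AND PROOFS =====
-- ---- proof-side notions: the step graph of support_parent ----

-- pvIter d n p = the node n parent-steps above p (none once the chain ends)
def pvIter (d : PySem.Dict String String) : Nat → String → Option String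
  | 0, p => some p
  | n+1, p => (d.get? p).bind (pvIter d n)

def pvReach (d : PySem.Dict String String) (p q : String) : Prop := ∃ n, pvIter d n p = some q

def pvCyc (d : PySem.Dict String String) (p : String) : Prop := ∃ n, pvIter d (n + 1) p = some p

-- number of parent keys not yet seen (the walk's termination measure)
def pvKc (d : PySem.Dict String String) (l : List String) : Nat :=
  ((d.keys).filter (fun k => !(l.contains k))).length

-- consecutive elements are parent steps
def pvChain (d : PySem.Dict String String) (l : List String) : Prop :=
  ∀ i a b, l[i]? = some a → l[i + 1]? = some b → d.get? a = some b

-- A's root of p (the value its port computes)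
def pvR (d : PySem.Dict String String) (p : String) : String :=
  groupRootA d (d.size + 1) PySem.Set.empty p

-- invariant of B's memo table: entries are A-roots, and a memoized cyclic node has
-- its whole cycle memoized
def pvInv (d root : PySem.Dict String String) : Prop :=
  (∀ k v, root.get? k = some v → v = pvR d k) ∧
  (∀ k q, root.contains k = true → pvCyc d k → pvReach d k q → root.contains q = true)

theorem pvIter_add (d : PySem.Dict String String) (a b : Nat) (p : String) :
    pvIter d (a + b) p = (pvIter d a p).bind (pvIter d b) := by
  induction a generalizing p with
  | zero => simp [pvIter]
  | succ a ih =>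
    rw [show a + 1 + b = (a + b) + 1 from by omega]
    simp only [pvIter]
    cases d.get? p with
    | none => simp
    | some q => simp [ih]

theorem pvIter_succ_right (d : PySem.Dict String String) (n : Nat) (p : String) :
    pvIter d (n + 1) p = (pvIter d n p).bind (fun q => d.get? q) := by
  rw [pvIter_add d n 1]
  cases pvIter d n p with
  | none => simp
  | some q => simp [pvIter]

theorem pvReach_trans {d : PySem.Dict String String} {p q r : String}
    (h1 : pvReach d p q) (h2 : pvReach d q r) : pvReach d p r := by
  obtain ⟨a, ha⟩ := h1
  obtain ⟨b, hb⟩ := h2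
  exact ⟨a + b, by rw [pvIter_add, ha]; simpa using hb⟩

theorem pvCyc_get?_isSome {d : PySem.Dict String String} {p : String} (h : pvCyc d p) :
    (d.get? p).isSome := by
  obtain ⟨n, hn⟩ := h
  simp only [pvIter] at hn
  cases hg : d.get? p with
  | none => rw [hg] at hn; simp at hn
  | some q => simp

theorem pvKc_append_lt {d : PySem.Dict String String} {c : String} {l : List String}
    (hmem : c ∈ d.keys) (hnc : c ∉ l) : pvKc d (l ++ [c]) < pvKc d l := by
  unfold pvKc
  have hsub : ∀ k : String, (!(l ++ [c]).contains k) = ((!l.contains k) && !(k == c)) := by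
    intro k
    have : ((l ++ [c]).contains k) = (l.contains k || (k == c)) := by
      by_cases h : k = c <;> simp [h]
    rw [this, Bool.not_or]
  simp only [hsub]
  have heq : (d.keys.filter (fun k => (!l.contains k) && !(k == c))) =
      ((d.keys.filter (fun k => !l.contains k)).filter (fun k => !(k == c))) := by
    rw [List.filter_filter]
    apply List.filter_congr
    intro k _
    rw [Bool.and_comm]
  rw [heq]
  apply List.length_filter_lt_length_iff_exists.mpr
  refine ⟨c, ?_, by simp⟩
  simp only [List.mem_filter]
  exact ⟨hmem, by simpa using hnc⟩

theorem mem_keys_of_get?_eq_some {d : PySem.Dict String String} {k v : String}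
    (h : d.get? k = some v) : k ∈ d.keys := by
  by_contra hmem
  rw [(PySem.Dict.get?_eq_none_iff_not_mem_keys d k).mpr hmem] at h
  simp at h

theorem pvKeys_len_eq_size (d : PySem.Dict String String) : d.keys.length = d.size := by
  simp [PySem.Dict.keys, PySem.Dict.size]

theorem groupRootA_fuel_mono (d : PySem.Dict String String) :
    ∀ (f g : Nat) (seen : PySem.Set String) (cur : String),
      pvKc d seen < f → pvKc d seen < g →
      groupRootA d f seen cur = groupRootA d g seen cur := by
  intro f
  induction f with
  | zero => intro g seen cur hf hg; omega
  | succ f ih =>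
    intro g seen cur hf hg
    cases g with
    | zero => omega
    | succ g =>
      simp only [groupRootA]
      by_cases hB : (d.contains cur && !(PySem.Set.contains seen cur)) = true
      · rw [if_pos hB, if_pos hB]
        obtain ⟨h1, h2'⟩ := Bool.and_eq_true_iff.mp hB
        have h2 : cur ∉ seen := by
          simp only [Bool.not_eq_true'] at h2'
          simpa using h2'
        have hmem : cur ∈ d.keys := (PySem.Dict.contains_iff_mem_keys d cur).mp h1
        rw [PySem.Set.add_of_not_mem h2]
        have hlt := pvKc_append_lt (d := d) hmem h2
        exact ih g (seen ++ [cur]) (d.getD cur "") (by omega) (by omega)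
      · rw [if_neg ?_, if_neg ?_] <;> simpa using hB

theorem groupRootA_seen_irrel (d : PySem.Dict String String) :
    ∀ (f : Nat) (S S' : PySem.Set String) (cur : String),
      (∀ x, pvReach d cur x → S.contains x = S'.contains x) →
      pvKc d S < f → pvKc d S' < f →
      groupRootA d f S cur = groupRootA d f S' cur := by
  intro f
  induction f with
  | zero => intro S S' cur h hS hS'; omega
  | succ f ih =>
    intro S S' cur h hS hS'
    have hcc : S.contains cur = S'.contains cur := h cur ⟨0, rfl⟩
    simp only [groupRootA]
    rw [show (PySem.Set.contains S cur) = (PySem.Set.contains S' cur) from hcc]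
    by_cases hB : (d.contains cur && !(PySem.Set.contains S' cur)) = true
    · rw [if_pos hB, if_pos hB]
      obtain ⟨h1, h2'⟩ := Bool.and_eq_true_iff.mp hB
      have h2 : cur ∉ S' := by
        simp only [Bool.not_eq_true'] at h2'
        simpa using h2'
      have h2S : cur ∉ S := by
        intro hmm
        have : S.contains cur = true := by simpa using hmm
        rw [hcc] at this
        exact h2 (by simpa using this)
      have hmem : cur ∈ d.keys := (PySem.Dict.contains_iff_mem_keys d cur).mp h1
      rw [PySem.Set.add_of_not_mem h2, PySem.Set.add_of_not_mem h2S]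
      have hstep : d.get? cur = some (d.getD cur "") := by
        rcases hv : d.get? cur with _ | v
        · exact absurd ((PySem.Dict.get?_eq_none_iff_not_mem_keys d cur).mp hv) (by simpa using hmem)
        · rw [PySem.Dict.getD_of_get?_eq_some d "" hv]
      apply ih
      · intro x hx
        have hrx : pvReach d cur x := by
          obtain ⟨n, hn⟩ := hx
          refine ⟨n + 1, ?_⟩
          simp [pvIter, hstep, hn]
        have hxx := h x hrx
        have e1 : ∀ (L : PySem.Set String), PySem.Set.contains (L ++ [cur]) x = (PySem.Set.contains L x || (x == cur)) := by
          intro L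
          by_cases hxc : x = cur <;> simp [PySem.Set.contains_eq_listContains, hxc]
        rw [e1, e1, hxx]
      · have := pvKc_append_lt (d := d) hmem h2S; omega
      · have := pvKc_append_lt (d := d) hmem h2; omega
    · rw [if_neg ?_, if_neg ?_] <;> simpa using hB

theorem pvR_of_none {d : PySem.Dict String String} {p : String} (h : d.get? p = none) :
    pvR d p = p := by
  unfold pvR
  have hc : d.contains p = false := by
    rw [PySem.Dict.contains_eq_isSome_get?, h]; rfl
  simp [groupRootA, hc]

theorem pvR_step_acyc {d : PySem.Dict String String} {p q : String}
    (hnc : ¬ pvCyc d p) (h : d.get? p = some q) :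
    pvR d p = pvR d q := by
  have hmem : p ∈ d.keys := mem_keys_of_get?_eq_some h
  have hcont : d.contains p = true := (PySem.Dict.contains_iff_mem_keys d p).mpr hmem
  have hks : d.keys.length = d.size := pvKeys_len_eq_size d
  have hkc_nil : pvKc d ([] : List String) = d.keys.length := by simp [pvKc]
  have hkc_p : pvKc d [p] < d.keys.length := by
    have := pvKc_append_lt (l := ([] : List String)) hmem (by simp)
    simpa [hkc_nil] using this
  have hpos : 0 < d.keys.length := List.length_pos_of_mem hmem
  have hgetD : d.getD p "" = q := PySem.Dict.getD_of_get?_eq_some d "" h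
  have hstep : pvR d p = groupRootA d d.size ([p] : PySem.Set String) q := by
    unfold pvR
    cases hsz : d.size with
    | zero => omega
    | succ sz =>
      simp only [groupRootA]
      rw [if_pos (by simp [hcont, PySem.Set.contains_eq_listContains])]
      rw [PySem.Set.add_of_not_mem (by simp), hgetD]
      simp
  rw [hstep]
  have h1 : groupRootA d d.size ([p] : PySem.Set String) q
      = groupRootA d (d.size + 1) ([p] : PySem.Set String) q :=
    groupRootA_fuel_mono d _ _ _ _ (by omega) (by omega)
  rw [h1]
  have h2 : groupRootA d (d.size + 1) ([p] : PySem.Set String) q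
      = groupRootA d (d.size + 1) PySem.Set.empty q := by
    apply groupRootA_seen_irrel
    · intro x hx
      have hxp : x ≠ p := by
        intro hxe
        subst hxe
        apply hnc
        obtain ⟨n, hn⟩ := hx
        exact ⟨n, by simp [pvIter, h, hn]⟩
      simp [PySem.Set.contains_eq_listContains, PySem.Set.empty, hxp]
    · omega
    · simp only [PySem.Set.empty]
      omega
  rw [h2]
  rfl

theorem pvChain_iter {d : PySem.Dict String String} {l : List String} (hch : pvChain d l) :
    ∀ (t i : Nat) (a c : String), l[i]? = some a → l[i + t]? = some c →
      pvIter d t a = some c := by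
  intro t
  induction t with
  | zero =>
    intro i a c ha hc
    rw [Nat.add_zero, ha] at hc
    simpa [pvIter] using hc
  | succ t ih =>
    intro i a c ha hc
    have hlen : i + t + 1 < l.length := (List.getElem?_eq_some_iff.mp (by rw [show i + (t+1) = i + t + 1 from by omega] at hc; exact hc)).1
    have hb : l[i + t]? = some (l[i + t]'(by omega)) := List.getElem?_eq_some_iff.mpr ⟨by omega, rfl⟩
    have hib := ih i a _ ha hb
    rw [pvIter_succ_right, hib]
    have := hch (i + t) _ c hb (by rw [show i + (t+1) = i + t + 1 from by omega] at hc; exact hc)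
    simpa using this

theorem pvIter_period {d : PySem.Dict String String} {m : Nat} {p : String}
    (h : pvIter d m p = some p) : ∀ a : Nat, pvIter d (a * m) p = some p := by
  intro a
  induction a with
  | zero => simp [pvIter]
  | succ a ih =>
    rw [show (a + 1) * m = a * m + m from by ring, pvIter_add, ih]
    simpa using h

theorem pvCyc_reach {d : PySem.Dict String String} {p q : String}
    (hc : pvCyc d p) (hr : pvReach d p q) : pvReach d q p ∧ pvCyc d q := by
  obtain ⟨m', hm'⟩ := hc
  obtain ⟨k, hk⟩ := hr
  set m := m' + 1 with hmdef
  have hm : pvIter d m p = some p := hm'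
  have hm0 : 0 < m := Nat.succ_pos _
  have hbig : ∀ a : Nat, pvIter d (a * m) p = some p := pvIter_period hm
  obtain ⟨a, ha⟩ : ∃ a : Nat, k ≤ a * m ∧ 0 < a * m := ⟨k + 1, by nlinarith, by nlinarith⟩
  have hsplit : pvIter d (k + (a * m - k)) p = some p := by
    rw [show k + (a * m - k) = a * m from by omega]
    exact hbig a
  rw [pvIter_add, hk] at hsplit
  simp only [Option.bind_some] at hsplit
  constructor
  · exact ⟨a * m - k, hsplit⟩
  · refine ⟨a * m - k + k - 1, ?_⟩
    rw [show a * m - k + k - 1 + 1 = (a * m - k) + k from by omega, pvIter_add, hsplit]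
    simpa using hk

theorem pvOrbit_cover {d : PySem.Dict String String} {m : Nat} {p q : String}
    (hm : pvIter d m p = some p) (h0 : 0 < m) (hr : pvReach d p q) :
    ∃ b, b < m ∧ pvIter d b p = some q := by
  obtain ⟨t, ht⟩ := hr
  refine ⟨t % m, Nat.mod_lt _ h0, ?_⟩
  have : pvIter d (t / m * m + t % m) p = some q := by
    rw [show t / m * m + t % m = t from by rw [Nat.mul_comm]; exact Nat.div_add_mod t m]
    exact ht
  rw [pvIter_add, pvIter_period hm (t / m)] at this
  simpa using this

theorem pvWalk_chain (d : PySem.Dict String String) :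
    ∀ (cs : List String) (e : String) (seen : PySem.Set String) (fuel : Nat),
      pvChain d (cs ++ [e]) → cs.Nodup →
      (∀ c ∈ cs, seen.contains c = false) →
      pvKc d seen < fuel →
      (d.get? e = none ∨ e ∈ cs ∨ seen.contains e = true) →
      groupRootA d fuel seen ((cs ++ [e]).headI) = e := by
  intro cs
  induction cs with
  | nil =>
    intro e seen fuel hch hnd hseen hfuel hterm
    cases fuel with
    | zero => omega
    | succ f =>
      simp only [List.nil_append, List.headI, groupRootA]
      rw [if_neg]
      intro hB
      obtain ⟨h1, h2⟩ := Bool.and_eq_true_iff.mp hB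
      rcases hterm with h | h | h
      · rw [PySem.Dict.contains_eq_isSome_get?, h] at h1; simp at h1
      · simp at h
      · rw [h] at h2; simp at h2
  | cons c cs' ih =>
    intro e seen fuel hch hnd hseen hfuel hterm
    cases fuel with
    | zero => omega
    | succ f =>
      have hne : (cs' ++ [e]) ≠ [] := by simp
      have hnext : (cs' ++ [e])[0]? = some ((cs' ++ [e]).headI) := by
        cases hcs : cs' ++ [e] with
        | nil => exact absurd hcs hne
        | cons y ys => simp
      have hstep : d.get? c = some ((cs' ++ [e]).headI) := by
        apply hch 0
        · simp
        · simpa using hnext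
      have hcontains : d.contains c = true := by
        rw [PySem.Dict.contains_eq_isSome_get?, hstep]; rfl
      have hcmem : c ∈ d.keys := mem_keys_of_get?_eq_some hstep
      have hcseen : c ∉ seen := by
        have := hseen c (by simp)
        intro hmm
        rw [show seen.contains c = true from by simpa using hmm] at this
        simp at this
      simp only [List.cons_append, List.headI, groupRootA]
      rw [if_pos (by simp [hcontains, PySem.Set.contains_eq_listContains, hcseen])]
      rw [PySem.Set.add_of_not_mem hcseen,
        PySem.Dict.getD_of_get?_eq_some d "" hstep]
      apply ih
      · intro i a b ha hb
        exact hch (i + 1) a b (by simpa using ha) (by simpa using hb)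
      · exact hnd.of_cons
      · intro x hx
        have hxs := hseen x (by simp [hx])
        have hxc : x ≠ c := by
          intro hmm; subst hmm
          exact (List.nodup_cons.mp hnd).1 hx
        by_cases hxm : x ∈ seen
        · rw [show seen.contains x = true from by simpa using hxm] at hxs
          simp at hxs
        · simp [PySem.Set.contains_eq_listContains, hxm, hxc]
      · have := pvKc_append_lt (d := d) hcmem hcseen
        omega
      · rcases hterm with h | h | h
        · exact Or.inl h
        · rcases List.mem_cons.mp h with h1 | h1
          · subst h1
            right; right
            simp [PySem.Set.contains_eq_listContains]
          · exact Or.inr (Or.inl h1)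
        · right; right
          simp only [PySem.Set.contains_eq_listContains] at h ⊢
          simp only [List.contains_append]
          simp [show e ∈ seen from by simpa using h]

theorem pvR_cyc {d : PySem.Dict String String} {p : String}
    (hc : pvCyc d p) : pvR d p = p := by
  obtain ⟨n0, hn0⟩ := hc
  have hex : ∃ n, pvIter d (n + 1) p = some p := ⟨n0, hn0⟩
  have hmp : pvIter d (Nat.find hex + 1) p = some p := Nat.find_spec hex
  set m := Nat.find hex + 1 with hm
  have hm0 : 0 < m := Nat.succ_pos _
  have hmin : ∀ k, 0 < k → k < m → pvIter d k p ≠ some p := by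
    intro k hk0 hkm hbad
    have := Nat.find_min hex (m := k - 1) (by omega)
    rw [show k - 1 + 1 = k from by omega] at this
    exact this hbad
  have hsome : ∀ i, i ≤ m → (pvIter d i p).isSome := by
    intro i him
    have hsplit : pvIter d (i + (m - i)) p = some p := by
      rw [show i + (m - i) = m from by omega]; exact hmp
    rw [pvIter_add] at hsplit
    cases hx : pvIter d i p with
    | none => rw [hx] at hsplit; simp at hsplit
    | some x => rfl
  set ob : List String := (List.range m).map (fun i => (pvIter d i p).getD p) with hob
  have hlen : ob.length = m := by simp [hob]
  have hget : ∀ i, i < m → ob[i]? = some ((pvIter d i p).getD p) := by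
    intro i hi
    simp [hob, hi]
  have hval : ∀ i, i < m → pvIter d i p = some ((pvIter d i p).getD p) := by
    intro i hi
    cases hx : pvIter d i p with
    | none => have := hsome i (by omega); rw [hx] at this; simp at this
    | some x => rfl
  have h0 : ob[0]? = some p := by
    rw [hget 0 hm0]
    simp [pvIter]
  have hchain : pvChain d (ob ++ [p]) := by
    intro i a b ha hb
    have hilen : i < m := by
      have := (List.getElem?_eq_some_iff.mp hb).1
      simp [hlen] at this
      omega
    have ha' : a = (pvIter d i p).getD p := by
      rw [List.getElem?_append_left (by omega : i < ob.length), hget i hilen] at ha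
      exact (Option.some_inj.mp ha).symm
    have hia : pvIter d i p = some a := by rw [hval i hilen, ← ha']
    by_cases hi1 : i + 1 < m
    · have hb' : b = (pvIter d (i+1) p).getD p := by
        rw [List.getElem?_append_left (by omega : i + 1 < ob.length), hget (i+1) hi1] at hb
        exact (Option.some_inj.mp hb).symm
      have hib : pvIter d (i+1) p = some b := by rw [hval (i+1) hi1, ← hb']
      rw [pvIter_succ_right, hia] at hib
      simpa using hib
    · have hi1e : i + 1 = m := by omega
      have hb' : b = p := by
        rw [List.getElem?_append_right (by omega : ob.length ≤ i + 1)] at hb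
        simp [hlen, hi1e] at hb
        exact hb.symm
      subst hb'
      have := hmp
      rw [← hi1e, pvIter_succ_right, hia] at this
      simpa using this
  have hnodup : ob.Nodup := by
    rw [List.nodup_iff_getElem?_ne_getElem?]
    intro i j hij hjlen hbad
    rw [hlen] at hjlen
    have hi : i < m := by omega
    rw [hget i hi, hget j hjlen] at hbad
    have hxi : pvIter d i p = some ((pvIter d i p).getD p) := hval i hi
    have hxj : pvIter d j p = some ((pvIter d i p).getD p) := by
      rw [hval j hjlen, ← Option.some_inj.mp hbad]
    have hsplitm : pvIter d (j + (m - j)) p = some p := by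
      rw [show j + (m - j) = m from by omega]; exact hmp
    rw [pvIter_add, hxj] at hsplitm
    simp only [Option.bind_some] at hsplitm
    have hshort : pvIter d (i + (m - j)) p = some p := by
      rw [pvIter_add, hxi]
      simpa using hsplitm
    exact hmin (i + (m - j)) (by omega) (by omega) hshort
  have hmem0 : p ∈ ob := by
    have := List.getElem?_eq_some_iff.mp h0
    obtain ⟨hl, he⟩ := this
    exact he ▸ List.getElem_mem hl
  have hhead : (ob ++ [p]).headI = p := by
    cases hcob : ob with
    | nil => rw [hcob] at hlen; simp at hlen
    | cons y ys =>
      rw [hcob] at h0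
      simp at h0
      simp [h0]
  have hks : d.keys.length = d.size := pvKeys_len_eq_size d
  have hkcb : pvKc d (PySem.Set.empty : PySem.Set String) ≤ d.keys.length :=
    List.length_filter_le _ _
  have := pvWalk_chain d ob p PySem.Set.empty (d.size + 1) hchain hnodup
    (fun c _ => rfl)
    (by omega)
    (Or.inr (Or.inl hmem0))
  rw [hhead] at this
  exact this

theorem pvChain_R_seg {d : PySem.Dict String String} {l : List String}
    (hch : pvChain d l) :
    ∀ (n t : Nat) (a b : String), l[t]? = some a → l[t + n]? = some b →
      (∀ i x, t ≤ i → i < t + n → l[i]? = some x → ¬ pvCyc d x) →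
      pvR d a = pvR d b := by
  intro n
  induction n with
  | zero =>
    intro t a b ha hb _
    rw [Nat.add_zero, ha] at hb
    rw [Option.some_inj.mp hb]
  | succ n ih =>
    intro t a b ha hb hcy
    have hlen : t + n + 1 < l.length := by
      have := (List.getElem?_eq_some_iff.mp (by rw [show t + (n+1) = t + n + 1 from by omega] at hb; exact hb)).1
      omega
    have hc1 : l[t + 1]? = some (l[t + 1]'(by omega)) := List.getElem?_eq_some_iff.mpr ⟨by omega, rfl⟩
    have hstep : d.get? a = some (l[t + 1]'(by omega)) := hch t a _ ha hc1
    have hacyc : ¬ pvCyc d a := hcy t a (by omega) (by omega) ha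
    rw [pvR_step_acyc hacyc hstep]
    apply ih (t + 1) _ b hc1 (by rw [show t + 1 + n = t + (n+1) from by omega]; exact hb)
    intro i x hi1 hi2 hx
    exact hcy i x (by omega) (by omega) hx

theorem pvFoldInsertSelf_get? :
    ∀ (l : List String) (root : PySem.Dict String String) (k : String),
      ((l.foldl (fun rt x => rt.insert x x) root).get? k) =
        if k ∈ l then some k else root.get? k := by
  intro l
  induction l with
  | nil => intro root k; simp
  | cons x xs ih =>
    intro root k
    simp only [List.foldl_cons]
    rw [ih]
    by_cases hmem : k ∈ xs
    · simp [hmem]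
    · by_cases hkx : k = x
      · subst hkx
        simp [hmem, PySem.Dict.get?_insert_self]
      · simp [hmem, hkx, PySem.Dict.get?_insert_of_ne _ _ hkx]

-- the main induction over B's while loop
theorem pvBRun (d : PySem.Dict String String) :
    ∀ (fuel : Nat) (root pos : PySem.Dict _ _) (path : List String) (cur : String),
      pvInv d root →
      pvChain d (path ++ [cur]) →
      path.Nodup →
      (∀ x ∈ path, root.contains x = false) →
      (∀ x ∈ path, (d.get? x).isSome) →
      (∀ x i, pos.get? x = some i → ∃ j : Nat, i = (j : Int) ∧ path[j]? = some x) →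
      (∀ x ∈ path, (pos.get? x).isSome) →
      pvKc d path < fuel →
      pvInv d (bLoop d fuel root pos path cur).1 ∧
      (bLoop d fuel root pos path cur).1.get? (bLoop d fuel root pos path cur).2.2 =
        some (pvR d (bLoop d fuel root pos path cur).2.2) ∧
      (∀ x ∈ (bLoop d fuel root pos path cur).2.1,
        (bLoop d fuel root pos path cur).1.contains x = false →
        ¬ pvCyc d x ∧ pvR d x = pvR d (bLoop d fuel root pos path cur).2.2) ∧
      ((bLoop d fuel root pos path cur).2.1 = path ∧ (bLoop d fuel root pos path cur).2.2 = cur ∨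
        ∃ suf, (bLoop d fuel root pos path cur).2.1 = path ++ cur :: suf) ∧
      (∀ k, root.contains k = true → (bLoop d fuel root pos path cur).1.contains k = true) ∧
      pvR d (((bLoop d fuel root pos path cur).2.1 ++ [(bLoop d fuel root pos path cur).2.2]).headI) =
        pvR d (bLoop d fuel root pos path cur).2.2 := by
  intro fuel
  induction fuel with
  | zero =>
    intro root pos path cur _ _ _ _ _ _ _ hfuel
    omega
  | succ fuel ih =>
    intro root pos path cur hinv hch hnodup hroot hkeys hpos hposS hfuel
    have hlenp : (path ++ [cur])[path.length]? = some cur := by simp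
    have hreach : ∀ (i : Nat) (x : String), path[i]? = some x → pvReach d x cur := by
      intro i x hx
      have hi : i < path.length := (List.getElem?_eq_some_iff.mp hx).1
      refine ⟨path.length - i, pvChain_iter hch (path.length - i) i x cur ?_ ?_⟩
      · rw [List.getElem?_append_left hi]; exact hx
      · rw [show i + (path.length - i) = path.length from by omega]; exact hlenp
    by_cases hra : root.contains cur = true
    · -- exit (a): cur already memoized
      have hred : bLoop d (fuel + 1) root pos path cur = (root, path, cur) := by
        simp only [bLoop]
        rw [if_pos hra]
      rw [hred]
      obtain ⟨v, hv⟩ : ∃ v, root.get? cur = some v := by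
        rw [PySem.Dict.contains_eq_isSome_get?] at hra
        cases hg : root.get? cur with
        | none => rw [hg] at hra; simp at hra
        | some v => exact ⟨v, rfl⟩
      have hvR : v = pvR d cur := hinv.1 cur v hv
      have hacyc : ∀ (i : Nat) (x : String), path[i]? = some x → ¬ pvCyc d x := by
        intro i x hx hcy
        obtain ⟨hrc, hcc⟩ := pvCyc_reach hcy (hreach i x hx)
        have := hinv.2 cur x hra hcc hrc
        have hi : i < path.length := (List.getElem?_eq_some_iff.mp hx).1
        have hmemx : x ∈ path := by
          obtain ⟨hl, he⟩ := List.getElem?_eq_some_iff.mp hx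
          exact he ▸ List.getElem_mem hl
        rw [hroot x hmemx] at this
        simp at this
      have hRseg : ∀ (i : Nat) (x : String), path[i]? = some x → pvR d x = pvR d cur := by
        intro i x hx
        have hi : i < path.length := (List.getElem?_eq_some_iff.mp hx).1
        apply pvChain_R_seg hch (path.length - i) i x cur
          (by rw [List.getElem?_append_left hi]; exact hx)
          (by rw [show i + (path.length - i) = path.length from by omega]; exact hlenp)
        intro i' y hi1 hi2 hy
        have hi' : i' < path.length := by omega
        apply hacyc i' y
        rw [List.getElem?_append_left hi'] at hy
        exact hy
      refine ⟨hinv, by rw [hv, hvR], ?_, Or.inl ⟨rfl, rfl⟩, fun k hk => hk, ?_⟩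
      · intro x hx _
        obtain ⟨i, hi⟩ := List.mem_iff_getElem?.mp hx
        exact ⟨hacyc i x hi, hRseg i x hi⟩
      · cases hp : path with
        | nil => simp
        | cons y ys =>
          have h0 : path[0]? = some y := by rw [hp]; simp
          have := hRseg 0 y h0
          simpa [hp] using this
    · rw [Bool.not_eq_true] at hra
      by_cases hpb : d.contains cur = true
      · -- cur has a parent
        have hnext : d.get? cur = some (d.getD cur "") := by
          rcases hv : d.get? cur with _ | v
          · rw [PySem.Dict.contains_eq_isSome_get?, hv] at hpb; simp at hpb
          · rw [PySem.Dict.getD_of_get?_eq_some d "" hv]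
        cases hpg : pos.get? cur with
        | some i =>
          -- exit (c): cycle detected
          obtain ⟨j, hij, hpj⟩ := hpos cur i hpg
          have hj : j < path.length := (List.getElem?_eq_some_iff.mp hpj).1
          have hslice : PySem.List.slice path (some i) none = path.drop j := by
            rw [hij]; exact PySem.List.slice_from_natCast path j
          have hred : bLoop d (fuel + 1) root pos path cur =
              ((path.drop j).foldl (fun rt node => rt.insert node node) root, path, cur) := by
            simp only [bLoop]
            rw [if_neg (by simp [hra]), if_neg (by simp [hpb]), hpg]
            simp only [hslice]
          rw [hred]
          set m := path.length - j with hmdef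
          have hm0 : 0 < m := by omega
          have hjcur : (path ++ [cur])[j]? = some cur := by
            rw [List.getElem?_append_left hj]; exact hpj
          have hitm : pvIter d m cur = some cur := by
            apply pvChain_iter hch m j cur cur hjcur
            rw [show j + m = path.length from by omega]; exact hlenp
          have hcyccur : pvCyc d cur := ⟨m - 1, by rw [show m - 1 + 1 = m from by omega]; exact hitm⟩
          have hRcur : pvR d cur = cur := pvR_cyc hcyccur
          have hdropget : ∀ b : Nat, (path.drop j)[b]? = path[j + b]? := by
            intro b
            rw [List.getElem?_drop]
          have hreachcur : ∀ b : Nat, b < m → ∀ x, path[j + b]? = some x → pvIter d b cur = some x := by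
            intro b hb x hx
            apply pvChain_iter hch b j cur x hjcur
            rw [List.getElem?_append_left (show j + b < path.length by omega)]
            exact hx
          have hmemdrop : ∀ q, pvReach d cur q → q ∈ path.drop j := by
            intro q hq
            obtain ⟨b, hb, hbit⟩ := pvOrbit_cover hitm hm0 hq
            obtain ⟨x, hx⟩ : ∃ x, path[j + b]? = some x :=
              ⟨path[j + b]'(by omega), List.getElem?_eq_some_iff.mpr ⟨by omega, rfl⟩⟩
            have hthis := hreachcur b hb x hx
            rw [hbit] at hthis
            have hqx : q = x := Option.some_inj.mp hthis
            rw [hqx]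
            have hdg : (path.drop j)[b]? = some x := by rw [hdropget b]; exact hx
            obtain ⟨hl, he⟩ := List.getElem?_eq_some_iff.mp hdg
            exact he ▸ List.getElem_mem hl
          have hdropcyc : ∀ x ∈ path.drop j, pvCyc d x ∧ pvR d x = x := by
            intro x hx
            obtain ⟨b, hb⟩ := List.mem_iff_getElem?.mp hx
            have hblen : b < m := by
              have := (List.getElem?_eq_some_iff.mp hb).1
              simp at this
              omega
            rw [hdropget b] at hb
            have hxv : pvIter d b cur = some x := hreachcur b hblen x hb
            have hcx : pvCyc d x := (pvCyc_reach hcyccur ⟨b, hxv⟩).2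
            exact ⟨hcx, pvR_cyc hcx⟩
          have hget' : ∀ k, ((path.drop j).foldl (fun rt node => rt.insert node node) root).get? k =
              if k ∈ path.drop j then some k else root.get? k := fun k => pvFoldInsertSelf_get? _ root k
          have hcont' : ∀ k, ((path.drop j).foldl (fun rt node => rt.insert node node) root).contains k =
              (decide (k ∈ path.drop j) || root.contains k) := by
            intro k
            rw [PySem.Dict.contains_eq_isSome_get?, hget']
            by_cases hk : k ∈ path.drop j
            · simp [hk]
            · simp [hk, PySem.Dict.contains_eq_isSome_get?]
          have hcurdrop : cur ∈ path.drop j := by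
            have hdg : (path.drop j)[0]? = some cur := by
              rw [hdropget 0, Nat.add_zero]
              exact hpj
            obtain ⟨hl, he⟩ := List.getElem?_eq_some_iff.mp hdg
            exact he ▸ List.getElem_mem hl
          have hprefacyc : ∀ (t : Nat) (x : String), t < j → path[t]? = some x → ¬ pvCyc d x := by
            intro t x ht hx hcy
            obtain ⟨hrc, _⟩ := pvCyc_reach hcy (hreach t x hx)
            have hxdrop : x ∈ path.drop j := hmemdrop x hrc
            obtain ⟨b, hb⟩ := List.mem_iff_getElem?.mp hxdrop
            have hblen : b < m := by
              have := (List.getElem?_eq_some_iff.mp hb).1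
              simp at this
              omega
            rw [hdropget b] at hb
            have hne := List.nodup_iff_getElem?_ne_getElem?.mp hnodup t (j + b) (by omega)
              (List.getElem?_eq_some_iff.mp hb).1
            rw [hx, hb] at hne
            exact hne rfl
          have hRpref : ∀ (t : Nat) (x : String), t ≤ j → path[t]? = some x → pvR d x = cur := by
            intro t x ht hx
            rw [← hRcur]
            apply pvChain_R_seg hch (j - t) t x cur
              (by rw [List.getElem?_append_left (List.getElem?_eq_some_iff.mp hx).1]; exact hx)
              (by rw [show t + (j - t) = j from by omega]; exact hjcur)
            intro i' y hi1 hi2 hy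
            have hi' : i' < path.length := by omega
            rw [List.getElem?_append_left hi'] at hy
            exact hprefacyc i' y (by omega) hy
          refine ⟨⟨?_, ?_⟩, ?_, ?_, Or.inl ⟨rfl, rfl⟩, ?_, ?_⟩
          · intro k v hkv
            rw [hget'] at hkv
            by_cases hk : k ∈ path.drop j
            · rw [if_pos hk] at hkv
              rw [← Option.some_inj.mp hkv, (hdropcyc k hk).2]
            · rw [if_neg hk] at hkv
              exact hinv.1 k v hkv
          · intro k q hk hcy hrq
            rw [hcont'] at hk ⊢
            rcases Bool.or_eq_true_iff.mp hk with h | h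
            · have hkd : k ∈ path.drop j := of_decide_eq_true h
              obtain ⟨b, hb⟩ := List.mem_iff_getElem?.mp hkd
              have hblen : b < m := by
                have := (List.getElem?_eq_some_iff.mp hb).1
                simp at this
                omega
              rw [hdropget b] at hb
              have hkv : pvIter d b cur = some k := hreachcur b hblen k hb
              have : pvReach d cur q := pvReach_trans ⟨b, hkv⟩ hrq
              have := hmemdrop q this
              simp [this]
            · have := hinv.2 k q h hcy hrq
              simp [this]
          · have : cur ∈ path.drop j := hcurdrop
            rw [hget', if_pos this, hRcur]
          · intro x hx hcf
            rw [hcont'] at hcf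
            have hxdrop : x ∉ path.drop j := by
              intro hmm
              rw [Bool.or_eq_false_iff] at hcf
              exact absurd (decide_eq_true hmm) (by simp [hcf.1])
            obtain ⟨t, hti⟩ := List.mem_iff_getElem?.mp hx
            have ht : t < j := by
              by_contra hge
              apply hxdrop
              have htl : t < path.length := (List.getElem?_eq_some_iff.mp hti).1
              have : (path.drop j)[t - j]? = some x := by
                rw [List.getElem?_drop, show j + (t - j) = t from by omega]
                exact hti
              obtain ⟨hl, he⟩ := List.getElem?_eq_some_iff.mp this
              exact he ▸ List.getElem_mem hl
            exact ⟨hprefacyc t x ht hti, by rw [hRpref t x (by omega) hti, hRcur]⟩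
          · intro k hk
            rw [hcont', hk]
            simp
          · cases hp : path with
            | nil => simp
            | cons y ys =>
              have h0 : path[0]? = some y := by rw [hp]; simp
              have := hRpref 0 y (by omega) h0
              rw [← hRcur] at this
              simpa [hp] using this
        | none =>
          -- recursive case
          have hcurnp : cur ∉ path := by
            intro hmm
            have := hposS cur hmm
            rw [hpg] at this
            simp at this
          have hred : bLoop d (fuel + 1) root pos path cur =
              bLoop d fuel root (pos.insert cur (path.length : Int)) (path ++ [cur]) (d.getD cur "") := by
            simp only [bLoop]
            rw [if_neg (by simp [hra]), if_neg (by simp [hpb]), hpg]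
          rw [hred]
          have hch' : pvChain d ((path ++ [cur]) ++ [d.getD cur ""]) := by
            intro i a b ha hb
            have hlb : i + 1 < path.length + 1 + 1 := by
              have := (List.getElem?_eq_some_iff.mp hb).1
              simpa using this
            by_cases hi : i + 1 < path.length + 1
            · have ha' : (path ++ [cur])[i]? = some a := by
                rw [List.getElem?_append_left (by simp; omega)] at ha
                exact ha
              have hb' : (path ++ [cur])[i + 1]? = some b := by
                rw [List.getElem?_append_left (by simp; omega)] at hb
                exact hb
              exact hch i a b ha' hb'
            · have hie : i = path.length := by omega
              have ha' : a = cur := by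
                rw [List.getElem?_append_left (by simp; omega), hie] at ha
                rw [hlenp] at ha
                exact (Option.some_inj.mp ha).symm
              have hb' : b = d.getD cur "" := by
                rw [List.getElem?_append_right (by simp; omega)] at hb
                simp [hie] at hb
                exact hb.symm
              rw [ha', hb']
              exact hnext
          have hnodup' : (path ++ [cur]).Nodup := by
            simp only [List.nodup_append]
            refine ⟨hnodup, List.nodup_singleton cur, ?_⟩
            intro a ha b hb
            rw [List.mem_singleton.mp hb]
            intro hac
            exact hcurnp (hac ▸ ha)
          have hroot' : ∀ x ∈ path ++ [cur], root.contains x = false := by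
            intro x hx
            rcases List.mem_append.mp hx with h | h
            · exact hroot x h
            · rw [List.mem_singleton.mp h]; exact hra
          have hkeys' : ∀ x ∈ path ++ [cur], (d.get? x).isSome := by
            intro x hx
            rcases List.mem_append.mp hx with h | h
            · exact hkeys x h
            · rw [List.mem_singleton.mp h, PySem.Dict.contains_eq_isSome_get?] at *
              rw [hnext]; rfl
          have hpos' : ∀ x i', (pos.insert cur (path.length : Int)).get? x = some i' →
              ∃ j : Nat, i' = (j : Int) ∧ (path ++ [cur])[j]? = some x := by
            intro x i' hx
            by_cases hxc : x = cur
            · subst hxc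
              rw [PySem.Dict.get?_insert_self] at hx
              refine ⟨path.length, (Option.some_inj.mp hx).symm, ?_⟩
              exact hlenp
            · rw [PySem.Dict.get?_insert_of_ne _ _ hxc] at hx
              obtain ⟨j, hj1, hj2⟩ := hpos x i' hx
              refine ⟨j, hj1, ?_⟩
              rw [List.getElem?_append_left (List.getElem?_eq_some_iff.mp hj2).1]
              exact hj2
          have hposS' : ∀ x ∈ path ++ [cur], ((pos.insert cur (path.length : Int)).get? x).isSome := by
            intro x hx
            rcases List.mem_append.mp hx with h | h
            · have hxc : x ≠ cur := fun he => hcurnp (he ▸ h)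
              rw [PySem.Dict.get?_insert_of_ne _ _ hxc]
              exact hposS x h
            · rw [List.mem_singleton.mp h, PySem.Dict.get?_insert_self]; rfl
          have hfuel' : pvKc d (path ++ [cur]) < fuel := by
            have hcm : cur ∈ d.keys := (PySem.Dict.contains_iff_mem_keys d cur).mp hpb
            have := pvKc_append_lt (d := d) hcm hcurnp
            omega
          obtain ⟨c1, c2, c3, c4, c5, c6⟩ := ih root (pos.insert cur (path.length : Int))
            (path ++ [cur]) (d.getD cur "") hinv hch' hnodup' hroot' hkeys' hpos' hposS' hfuel'
          refine ⟨c1, c2, c3, ?_, c5, c6⟩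
          rcases c4 with ⟨h1, h2⟩ | ⟨suf, hsuf⟩
          · right
            exact ⟨[], by rw [h1]⟩
          · right
            refine ⟨d.getD cur "" :: suf, ?_⟩
            rw [hsuf]
            simp
      · -- exit (b): chain end
        rw [Bool.not_eq_true] at hpb
        have hcurnone : d.get? cur = none := by
          rw [PySem.Dict.contains_eq_isSome_get?] at hpb
          cases hg : d.get? cur with
          | none => rfl
          | some v => rw [hg] at hpb; simp at hpb
        have hred : bLoop d (fuel + 1) root pos path cur = (root.insert cur cur, path, cur) := by
          simp only [bLoop]
          rw [if_neg (by simp [hra]), if_pos (by simp [hpb])]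
        rw [hred]
        have hRcur : pvR d cur = cur := pvR_of_none hcurnone
        have hnocyccur : ¬ pvCyc d cur := by
          intro hc
          have := pvCyc_get?_isSome hc
          rw [hcurnone] at this
          simp at this
        have hacyc : ∀ (i : Nat) (x : String), path[i]? = some x → ¬ pvCyc d x := by
          intro i x hx hcy
          exact hnocyccur (pvCyc_reach hcy (hreach i x hx)).2
        have hRseg : ∀ (i : Nat) (x : String), path[i]? = some x → pvR d x = pvR d cur := by
          intro i x hx
          have hi : i < path.length := (List.getElem?_eq_some_iff.mp hx).1
          apply pvChain_R_seg hch (path.length - i) i x cur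
            (by rw [List.getElem?_append_left hi]; exact hx)
            (by rw [show i + (path.length - i) = path.length from by omega]; exact hlenp)
          intro i' y hi1 hi2 hy
          have hi' : i' < path.length := by omega
          rw [List.getElem?_append_left hi'] at hy
          exact hacyc i' y hy
        refine ⟨⟨?_, ?_⟩, ?_, ?_, Or.inl ⟨rfl, rfl⟩, ?_, ?_⟩
        · intro k v hkv
          by_cases hkc : k = cur
          · subst hkc
            rw [PySem.Dict.get?_insert_self] at hkv
            rw [← Option.some_inj.mp hkv, hRcur]
          · rw [PySem.Dict.get?_insert_of_ne _ _ hkc] at hkv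
            exact hinv.1 k v hkv
        · intro k q hk hcy hrq
          rw [PySem.Dict.contains_insert] at hk ⊢
          rcases Bool.or_eq_true_iff.mp hk with h | h
          · have hkcur : k = cur := by simpa using h
            subst hkcur
            exact absurd hcy hnocyccur
          · have := hinv.2 k q h hcy hrq
            simp [this]
        · rw [PySem.Dict.get?_insert_self, hRcur]
        · intro x hx _
          obtain ⟨i, hi⟩ := List.mem_iff_getElem?.mp hx
          exact ⟨hacyc i x hi, hRseg i x hi⟩
        · intro k hk
          rw [PySem.Dict.contains_insert, hk]
          simp
        · cases hp : path with
          | nil => simp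
          | cons y ys =>
            have h0 : path[0]? = some y := by rw [hp]; simp
            have := hRseg 0 y h0
            simpa [hp] using this

theorem pvTailFold_inv (d : PySem.Dict String String) (r : String) :
    ∀ (l : List String) (root root0 : PySem.Dict String String),
      pvInv d root →
      (∀ x ∈ l, root0.contains x = false → ¬ pvCyc d x ∧ pvR d x = r) →
      (∀ k, root0.contains k = true → root.contains k = true) →
      pvInv d (l.foldl (fun rt node => if rt.contains node then rt else rt.insert node r) root) := by
  intro l
  induction l with
  | nil => intro root root0 hinv _ _; exact hinv
  | cons x xs ih =>
    intro root root0 hinv hl hmono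
    simp only [List.foldl_cons]
    by_cases hc : root.contains x = true
    · rw [if_pos hc]
      exact ih root root0 hinv (fun y hy => hl y (by simp [hy])) hmono
    · rw [if_neg hc]
      have hx0 : root0.contains x = false := by
        cases h0 : root0.contains x
        · rfl
        · exact absurd (hmono x h0) hc
      obtain ⟨hxc, hxr⟩ := hl x (by simp) hx0
      apply ih
      · constructor
        · intro k v hkv
          by_cases hkx : k = x
          · subst hkx
            rw [PySem.Dict.get?_insert_self] at hkv
            rw [← Option.some_inj.mp hkv, hxr]
          · rw [PySem.Dict.get?_insert_of_ne _ _ hkx] at hkv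
            exact hinv.1 k v hkv
        · intro k q hk hcy hreach
          have hkx : k ≠ x := by
            intro he; subst he; exact hxc hcy
          rw [PySem.Dict.contains_insert] at hk ⊢
          rcases Bool.or_eq_true_iff.mp hk with h | h
          · exact absurd (by simpa using h) hkx
          · have := hinv.2 k q h hcy hreach
            simp [this]
      · intro y hy hy0
        exact hl y (by simp [hy]) hy0
      · intro k hk
        have := hmono k hk
        rw [PySem.Dict.contains_insert]
        simp [this]

-- per-prim: B's step computes A's root and preserves the invariant
theorem pvStep_root (d : PySem.Dict String String)
    (root : PySem.Dict String String) (p : String) (hinv : pvInv d root) :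
    (bLoop d (d.size + 1) root PySem.Dict.empty [] p).1.getD
        (bLoop d (d.size + 1) root PySem.Dict.empty [] p).2.2 "" = pvR d p ∧
    pvInv d ((bLoop d (d.size + 1) root PySem.Dict.empty [] p).2.1.foldl
      (fun rt node => if rt.contains node then rt else
        rt.insert node ((bLoop d (d.size + 1) root PySem.Dict.empty [] p).1.getD
          (bLoop d (d.size + 1) root PySem.Dict.empty [] p).2.2 ""))
      (bLoop d (d.size + 1) root PySem.Dict.empty [] p).1) := by
  have hch0 : pvChain d ([] ++ [p]) := by
    intro i a b _ hb
    have := (List.getElem?_eq_some_iff.mp hb).1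
    simp at this
  have hkc0 : pvKc d ([] : List String) ≤ d.keys.length := List.length_filter_le _ _
  have hks := pvKeys_len_eq_size d
  obtain ⟨c1, c2, c3, c4, c5, c6⟩ := pvBRun d (d.size + 1) root PySem.Dict.empty [] p
    hinv hch0 List.nodup_nil (by simp) (by simp)
    (by intro x i h; rw [PySem.Dict.get?_empty] at h; simp at h)
    (by simp) (by omega)
  have hr : (bLoop d (d.size + 1) root PySem.Dict.empty [] p).1.getD
      (bLoop d (d.size + 1) root PySem.Dict.empty [] p).2.2 "" =
      pvR d (bLoop d (d.size + 1) root PySem.Dict.empty [] p).2.2 :=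
    PySem.Dict.getD_of_get?_eq_some _ "" c2
  have hRp : pvR d (bLoop d (d.size + 1) root PySem.Dict.empty [] p).2.2 = pvR d p := by
    rcases c4 with ⟨h1, h2⟩ | ⟨suf, hsuf⟩
    · rw [h2]
    · rw [List.nil_append] at hsuf
      rw [hsuf] at c6
      simpa using c6.symm
  constructor
  · rw [hr, hRp]
  · apply pvTailFold_inv d _ _ _ (bLoop d (d.size + 1) root PySem.Dict.empty [] p).1 c1
    · intro x hx hcf
      obtain ⟨hc, hR⟩ := c3 x hx hcf
      rw [hr, hRp] at *
      exact ⟨hc, by rw [hR, hRp]⟩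
    · exact fun k hk => hk

theorem pvModify_append (g : PySem.Dict String (List String)) (r p : String) :
    g.modify r [] (fun ms => ms ++ [p]) =
      match g.get? r with
      | some ms => g.insert r (ms ++ [p])
      | none => g.insert r [p] := by
  show g.insert r ((g.getD r []) ++ [p]) = _
  rw [PySem.Dict.getD_eq_get?_getD]
  cases hg : g.get? r with
  | none => simp
  | some ms => simp

-- the two folds over prim_paths build the same groups dict
theorem pvOuter_fold (d : PySem.Dict String String) :
    ∀ (prims : List String) (root : PySem.Dict String String) (g : PySem.Dict String (List String)),
      pvInv d root →
      (prims.foldl (fun st p =>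
        let root0 := st.1
        let groups := st.2
        let t := bLoop d (d.size + 1) root0 PySem.Dict.empty [] p
        let root1 := t.1
        let path := t.2.1
        let cur := t.2.2
        let r := root1.getD cur ""
        let root2 := path.foldl (fun rt node => if rt.contains node then rt else rt.insert node r) root1
        let groups' :=
          match groups.get? r with
          | some ms => groups.insert r (ms ++ [p])
          | none => groups.insert r [p]
        (root2, groups')) (root, g)).2 =
      prims.foldl (fun g' prim_path =>
        g'.modify (groupRootA d (d.size + 1) PySem.Set.empty prim_path) [] (fun ms => ms ++ [prim_path])) g := by
  intro prims
  induction prims with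
  | nil => intro root g _; rfl
  | cons p ps ih =>
    intro root g hinv
    obtain ⟨hr, hinv2⟩ := pvStep_root d root p hinv
    simp only [List.foldl_cons]
    rw [pvModify_append]
    have hkey : (groupRootA d (d.size + 1) PySem.Set.empty p) =
        (bLoop d (d.size + 1) root PySem.Dict.empty [] p).1.getD
          (bLoop d (d.size + 1) root PySem.Dict.empty [] p).2.2 "" := hr.symm
    rw [hkey]
    exact ih _ _ hinv2

theorem pvRelation_tokens_eq (s : String) :
    relation_tokens s = ((PySem.Str.split? s ",").getD []).filter (fun tok => !(tok = "")) := by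
  unfold relation_tokens
  rw [PySem.List.foldl_congr_mem _ _
    (fun (toks : List String) rel => if !(rel = "") then toks ++ [rel] else toks) []
    (by intro acc x _; by_cases hx : x = "" <;> simp [hx])]
  rw [PySem.List.foldl_append_if_eq_filter]
  simp

-- A's edge step = B's edge step, and the parent dict has unique keys
theorem pvEdgeStep_eq (prim_set : PySem.Set String) (de : PySem.Dict String String)
    (edge : List (String × String)) :
    (match support_pair (PySem.Dict.mk edge) with
      | none => de
      | some (source_path, target_path) =>
        if PySem.Set.contains prim_set source_path && PySem.Set.contains prim_set target_path then
          de.insert source_path target_path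
        else de) =
    (let source := PySem.Dict.get? (PySem.Dict.mk edge) "source"
     let target := PySem.Dict.get? (PySem.Dict.mk edge) "target"
     match source, target with
     | some s, some t =>
       if s = "" || t = "" then de
       else
         let rels := ((PySem.Str.split? (PySem.Dict.getD (PySem.Dict.mk edge) "relation" "") ",").getD []).filter
           (fun tok => !(tok = ""))
         if rels.contains "supported by" then sgRecordEdge prim_set de s t
         else if rels.contains "supports" then sgRecordEdge prim_set de t s
         else de
     | _, _ => de) := by
  simp only [support_pair, sgRecordEdge, pvRelation_tokens_eq]
  cases hs : PySem.Dict.get? (PySem.Dict.mk edge) "source" with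
  | none => simp
  | some s =>
    cases ht : PySem.Dict.get? (PySem.Dict.mk edge) "target" with
    | none => simp
    | some t =>
      simp only
      by_cases hempty : (s = "" || t = "") = true
      · simp [hempty]
      · by_cases hm1 : "supported by" ∈ (PySem.Str.split? (PySem.Dict.getD (PySem.Dict.mk edge) "relation" "") ",").getD [] <;>
          by_cases hm2 : "supports" ∈ (PySem.Str.split? (PySem.Dict.getD (PySem.Dict.mk edge) "relation" "") ",").getD [] <;>
          simp [hempty, hm1, hm2]

theorem pvInv_empty (dA : PySem.Dict String String) : pvInv dA PySem.Dict.empty := by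
  constructor
  · intro k v h
    rw [PySem.Dict.get?_empty] at h
    simp at h
  · intro k q hk
    rw [PySem.Dict.contains_empty] at hk
    simp at hk

-- assembling the two ports' main computations, with the shared parent dict abstracted
theorem pvAssemble (P : List String) (dA dB : PySem.Dict String String)
    (hd : dB = dA) :
    (P.foldl (fun st p =>
        let root0 := st.1
        let groups := st.2
        let t := bLoop dB (dB.size + 1) root0 PySem.Dict.empty [] p
        let root1 := t.1
        let path := t.2.1
        let cur := t.2.2
        let r := root1.getD cur ""
        let root2 := path.foldl (fun rt node => if rt.contains node then rt else rt.insert node r) root1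
        let groups' :=
          match groups.get? r with
          | some ms => groups.insert r (ms ++ [p])
          | none => groups.insert r [p]
        (root2, groups'))
      ((PySem.Dict.empty : PySem.Dict String String), (PySem.Dict.empty : PySem.Dict String (List String)))).2.items.map
        (fun pr => (pr.1, PySem.List.sorted pr.2 (fun x => x) false)) =
    (P.foldl (fun g prim_path =>
        g.modify (groupRootA dA (dA.size + 1) PySem.Set.empty prim_path) [] (fun ms => ms ++ [prim_path]))
      (PySem.Dict.empty : PySem.Dict String (List String))).items.map
        (fun pr => (pr.1, PySem.List.sorted pr.2 (fun x => x) false)) := by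
  subst hd
  rw [pvOuter_fold dB P PySem.Dict.empty PySem.Dict.empty (pvInv_empty dB)]

-- ===== VERDICT (by name: the statement is the Claim_ definition above) =====
theorem support_groups_py_spec : Claim_equal_support_groups_py := by
  intro object_entries edges _
  unfold Spec_support_groups_py
  exact (pvAssemble
    (object_entries.foldl (fun acc entry =>
      match PySem.Dict.get? (PySem.Dict.mk entry) "prim" with
      | some s => acc ++ [s]
      | none => acc) [])
    (edges.foldl (fun de edge =>
      match support_pair (PySem.Dict.mk edge) with
      | none => de
      | some (source_path, target_path) =>
        if PySem.Set.contains (PySem.Set.ofList (object_entries.foldl (fun acc entry =>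
              match PySem.Dict.get? (PySem.Dict.mk entry) "prim" with
              | some s => acc ++ [s]
              | none => acc) [])) source_path &&
            PySem.Set.contains (PySem.Set.ofList (object_entries.foldl (fun acc entry =>
              match PySem.Dict.get? (PySem.Dict.mk entry) "prim" with
              | some s => acc ++ [s]
              | none => acc) [])) target_path then
          de.insert source_path target_path
        else de) PySem.Dict.empty)
    (edges.foldl (fun de edge =>
      let source := PySem.Dict.get? (PySem.Dict.mk edge) "source"
      let target := PySem.Dict.get? (PySem.Dict.mk edge) "target"
      match source, target with
      | some s, some t =>
        if s = "" || t = "" then de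
        else
          let rels := ((PySem.Str.split? (PySem.Dict.getD (PySem.Dict.mk edge) "relation" "") ",").getD []).filter
            (fun tok => !(tok = ""))
          if rels.contains "supported by" then
            sgRecordEdge (PySem.Set.ofList (object_entries.foldl (fun acc entry =>
              match PySem.Dict.get? (PySem.Dict.mk entry) "prim" with
              | some s => acc ++ [s]
              | none => acc) [])) de s t
          else if rels.contains "supports" then
            sgRecordEdge (PySem.Set.ofList (object_entries.foldl (fun acc entry =>
              match PySem.Dict.get? (PySem.Dict.mk entry) "prim" with
              | some s => acc ++ [s]
              | none => acc) [])) de t s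
          else de
      | _, _ => de) PySem.Dict.empty)
    (PySem.List.foldl_congr_mem edges _ _ PySem.Dict.empty
      (fun acc x _ => pvEdgeStep_eq _ acc x)).symm).symm
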